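-- pv_equiv track=rewrite | github.com/sushmitha1007/MarkettingTool | linkedinscraper/core/LinkedInGoogleSearcher_Gen.py | containsInclusionWord
-- ===== SOURCE A (Python) =====
-- def containsInclusionWord(title, description):
--     list_ = ["a", "b", "c", "d", "e", "f", "g", "h", "i", "j", "k", "l", "m", "n", "o", "p", "q", "r", "s", "t", "u",
--              "v", "w", "x", "y", "z"]
--
--     if any(keyword.lower() in title.lower() for keyword in list_) or any(
--             keyword.lower() in description.lower() for keyword in list_):
--         return True
--     else:
--         return False
-- ===== SOURCE B (Python) =====
-- def containsInclusionWord(title, description):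
--     return any('a' <= c <= 'z' for c in title.lower()) or any(
--         'a' <= c <= 'z' for c in description.lower())
-- ===== Notes on version B (the rewrite author's own statement) =====
-- stated objective: idiomatic
-- what changed: Replaces the 26-letter outer loop of substring scans over the lowered strings with a single character-major pass testing 'a' <= c <= 'z' on each lowered character.
import Mathlib
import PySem

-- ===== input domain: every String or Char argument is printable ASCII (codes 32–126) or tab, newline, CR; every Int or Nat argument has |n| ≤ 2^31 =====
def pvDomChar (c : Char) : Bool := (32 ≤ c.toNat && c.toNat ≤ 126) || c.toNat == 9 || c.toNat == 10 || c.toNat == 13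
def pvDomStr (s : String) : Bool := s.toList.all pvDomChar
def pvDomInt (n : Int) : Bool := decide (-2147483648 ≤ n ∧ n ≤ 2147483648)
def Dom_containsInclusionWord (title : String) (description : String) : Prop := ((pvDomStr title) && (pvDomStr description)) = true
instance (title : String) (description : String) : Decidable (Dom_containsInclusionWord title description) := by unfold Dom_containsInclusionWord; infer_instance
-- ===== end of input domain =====

-- B replaces A's letter-major double scan (26 substring tests per string) by one
-- character-major pass with a range test 'a' ≤ c ≤ 'z' over each lowered string (idiomatic).

-- ===== PORT A =====
-- literal port: the 26 one-letter keywords, 'any(keyword.lower() in title.lower() ...)' twice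
def containsInclusionWord (title : String) (description : String) : Bool :=
  let list_ : List String := ["a", "b", "c", "d", "e", "f", "g", "h", "i", "j", "k", "l",
    "m", "n", "o", "p", "q", "r", "s", "t", "u", "v", "w", "x", "y", "z"]
  if (list_.any fun keyword => PySem.Str.isIn (PySem.Str.lower keyword) (PySem.Str.lower title)) ||
     (list_.any fun keyword => PySem.Str.isIn (PySem.Str.lower keyword) (PySem.Str.lower description)) then
    true
  else
    false

-- ===== PORT B =====
-- literal port of Source B: any('a' <= c <= 'z' for c in s.lower()) for each string
def containsInclusionWord_alt (title : String) (description : String) : Bool :=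
  ((PySem.Str.lower title).toList.any fun c => decide ('a' ≤ c) && decide (c ≤ 'z')) ||
  ((PySem.Str.lower description).toList.any fun c => decide ('a' ≤ c) && decide (c ≤ 'z'))

-- ===== PRECONDITION & SPEC =====
def Spec_containsInclusionWord (title : String) (description : String) (out : Bool) : Prop := out = containsInclusionWord_alt title description
instance (title : String) (description : String) (out : Bool) : Decidable (Spec_containsInclusionWord title description out) := by unfold Spec_containsInclusionWord; infer_instance

-- ===== CLAIM (what is proved, stated in full; the proofs are below) =====
def Claim_equal_containsInclusionWord : Prop := ∀ (title : String) (description : String), Dom_containsInclusionWord title description → Spec_containsInclusionWord title description (containsInclusionWord title description)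

-- ===== LEMMAS AND PROOFS =====

-- a one-character needle is a substring iff the character occurs
theorem isIn_singleton (k : Char) (s : List Char) :
    PySem.Chars.isIn [k] s = s.contains k := by
  rcases h : s.contains k with _ | _
  · rw [PySem.Chars.isIn_eq_false_iff]
    intro hinf
    have : k ∈ s := List.singleton_sublist.mp hinf.sublist
    simp [List.contains_eq_mem, this] at h
  · rw [PySem.Chars.isIn_iff_infix]
    have hk : k ∈ s := by simpa [List.contains_eq_mem] using h
    obtain ⟨u, v, rfl⟩ := List.append_of_mem hk
    exact ⟨u, v, by simp⟩

-- a character equals one of the 26 lowercase letters iff it lies in the range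
theorem mem_letters_iff (c : Char) :
    ('a' ≤ c ∧ c ≤ 'z') ↔
      c ∈ (['a','b','c','d','e','f','g','h','i','j','k','l','m','n','o','p','q','r','s','t','u','v','w','x','y','z'] : List Char) := by
  constructor
  · rintro ⟨h1, h2⟩
    have h1' : 97 ≤ c.toNat := h1
    have h2' : c.toNat ≤ 122 := h2
    simp only [List.mem_cons, List.not_mem_nil, or_false]
    have : c = Char.ofNat c.toNat := (Char.ofNat_toNat c).symm
    interval_cases h : c.toNat <;> simp_all
  · intro h
    fin_cases h <;> exact ⟨by decide, by decide⟩

-- the letter-major scan over one lowered string equals the character-major scan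
theorem scan_eq (s : List Char) :
    ((["a", "b", "c", "d", "e", "f", "g", "h", "i", "j", "k", "l",
       "m", "n", "o", "p", "q", "r", "s", "t", "u", "v", "w", "x", "y", "z"] : List String).any
        fun keyword => PySem.Chars.isIn keyword.toList s) =
    (s.any fun c => decide ('a' ≤ c) && decide (c ≤ 'z')) := by
  simp only [List.any_cons, List.any_nil, Bool.or_false]
  rcases hr : s.any fun c => decide ('a' ≤ c) && decide (c ≤ 'z') with _ | _
  · simp only [List.any_eq_false] at hr
    have hnc : ∀ k ∈ (['a','b','c','d','e','f','g','h','i','j','k','l','m','n','o','p','q','r','s','t','u','v','w','x','y','z'] : List Char), k ∉ s := by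
      intro k hk hks
      have := hr k hks
      have hrange := (mem_letters_iff k).mpr hk
      simp [hrange.1, hrange.2] at this
    simp only [show ("a":String).toList = ['a'] from rfl, show ("b":String).toList = ['b'] from rfl, show ("c":String).toList = ['c'] from rfl, show ("d":String).toList = ['d'] from rfl, show ("e":String).toList = ['e'] from rfl, show ("f":String).toList = ['f'] from rfl, show ("g":String).toList = ['g'] from rfl, show ("h":String).toList = ['h'] from rfl, show ("i":String).toList = ['i'] from rfl, show ("j":String).toList = ['j'] from rfl, show ("k":String).toList = ['k'] from rfl, show ("l":String).toList = ['l'] from rfl, show ("m":String).toList = ['m'] from rfl, show ("n":String).toList = ['n'] from rfl, show ("o":String).toList = ['o'] from rfl, show ("p":String).toList = ['p'] from rfl, show ("q":String).toList = ['q'] from rfl, show ("r":String).toList = ['r'] from rfl, show ("s":String).toList = ['s'] from rfl, show ("t":String).toList = ['t'] from rfl, show ("u":String).toList = ['u'] from rfl, show ("v":String).toList = ['v'] from rfl, show ("w":String).toList = ['w'] from rfl, show ("x":String).toList = ['x'] from rfl, show ("y":String).toList = ['y'] from rfl, show ("z":String).toList = ['z'] from rfl]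
    simp only [isIn_singleton, List.contains_eq_mem]
    simp only [Bool.or_eq_false_iff, decide_eq_false_iff_not]
    exact ⟨hnc _ (by decide), hnc _ (by decide), hnc _ (by decide), hnc _ (by decide), hnc _ (by decide), hnc _ (by decide), hnc _ (by decide), hnc _ (by decide), hnc _ (by decide), hnc _ (by decide), hnc _ (by decide), hnc _ (by decide), hnc _ (by decide), hnc _ (by decide), hnc _ (by decide), hnc _ (by decide), hnc _ (by decide), hnc _ (by decide), hnc _ (by decide), hnc _ (by decide), hnc _ (by decide), hnc _ (by decide), hnc _ (by decide), hnc _ (by decide), hnc _ (by decide), hnc _ (by decide)⟩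
  · obtain ⟨c, hcs, hc⟩ := List.any_eq_true.mp hr
    have hrange : 'a' ≤ c ∧ c ≤ 'z' := by simpa using hc
    have hk := (mem_letters_iff c).mp hrange
    simp only [show ("a":String).toList = ['a'] from rfl, show ("b":String).toList = ['b'] from rfl, show ("c":String).toList = ['c'] from rfl, show ("d":String).toList = ['d'] from rfl, show ("e":String).toList = ['e'] from rfl, show ("f":String).toList = ['f'] from rfl, show ("g":String).toList = ['g'] from rfl, show ("h":String).toList = ['h'] from rfl, show ("i":String).toList = ['i'] from rfl, show ("j":String).toList = ['j'] from rfl, show ("k":String).toList = ['k'] from rfl, show ("l":String).toList = ['l'] from rfl, show ("m":String).toList = ['m'] from rfl, show ("n":String).toList = ['n'] from rfl, show ("o":String).toList = ['o'] from rfl, show ("p":String).toList = ['p'] from rfl, show ("q":String).toList = ['q'] from rfl, show ("r":String).toList = ['r'] from rfl, show ("s":String).toList = ['s'] from rfl, show ("t":String).toList = ['t'] from rfl, show ("u":String).toList = ['u'] from rfl, show ("v":String).toList = ['v'] from rfl, show ("w":String).toList = ['w'] from rfl, show ("x":String).toList = ['x'] from rfl, show ("y":String).toList = ['y'] from rfl,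 show ("z":String).toList = ['z'] from rfl]
    fin_cases hk <;> simp [isIn_singleton, List.contains_eq_mem, hcs]

-- ===== VERDICT (by name: the statement is the Claim_ definition above) =====
theorem containsInclusionWord_spec : Claim_equal_containsInclusionWord := by
  intro title description _
  show containsInclusionWord title description = containsInclusionWord_alt title description
  unfold containsInclusionWord containsInclusionWord_alt
  have key : ∀ (s : String),
      ((["a", "b", "c", "d", "e", "f", "g", "h", "i", "j", "k", "l",
         "m", "n", "o", "p", "q", "r", "s", "t", "u", "v", "w", "x", "y", "z"] : List String).any
          fun keyword => PySem.Str.isIn (PySem.Str.lower keyword) (PySem.Str.lower s)) =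
      ((PySem.Str.lower s).toList.any fun c => decide ('a' ≤ c) && decide (c ≤ 'z')) := by
    intro s
    have := scan_eq (PySem.Str.lower s).toList
    simpa [PySem.Str.isIn, List.any_cons, List.any_nil,
      show PySem.Str.lower "a" = "a" from rfl, show PySem.Str.lower "b" = "b" from rfl,
      show PySem.Str.lower "c" = "c" from rfl, show PySem.Str.lower "d" = "d" from rfl,
      show PySem.Str.lower "e" = "e" from rfl, show PySem.Str.lower "f" = "f" from rfl,
      show PySem.Str.lower "g" = "g" from rfl, show PySem.Str.lower "h" = "h" from rfl,
      show PySem.Str.lower "i" = "i" from rfl, show PySem.Str.lower "j" = "j" from rfl,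
      show PySem.Str.lower "k" = "k" from rfl, show PySem.Str.lower "l" = "l" from rfl,
      show PySem.Str.lower "m" = "m" from rfl, show PySem.Str.lower "n" = "n" from rfl,
      show PySem.Str.lower "o" = "o" from rfl, show PySem.Str.lower "p" = "p" from rfl,
      show PySem.Str.lower "q" = "q" from rfl, show PySem.Str.lower "r" = "r" from rfl,
      show PySem.Str.lower "s" = "s" from rfl, show PySem.Str.lower "t" = "t" from rfl,
      show PySem.Str.lower "u" = "u" from rfl, show PySem.Str.lower "v" = "v" from rfl,
      show PySem.Str.lower "w" = "w" from rfl, show PySem.Str.lower "x" = "x" from rfl,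
      show PySem.Str.lower "y" = "y" from rfl, show PySem.Str.lower "z" = "z" from rfl] using this
  simp only [key]
  split_ifs with h
  · exact h.symm
  · simpa using h
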